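-- pv_equiv track=rewrite | github.com/Indigo-gg/llmscivis | experiment_results/analys/replace_retriever_result.py | extract_title_from_path
-- ===== SOURCE A (Python) =====
-- def extract_title_from_path(file_path):
--     """
--     从文件路径提取模块标题
--     例如: "data\\vtkjs-examples\\prompt-sample\\Filter-ImageLabelOutline\\code.html" -> "Filter-ImageLabelOutline"
--     """
--     try:
--         parts = file_path.replace('\\', '/').split('/')
--         for part in parts:
--             if part.startswith('Filter-') or part.startswith('Rendering-') or part.startswith('IO-'):
--                 return part
--     except:
--         pass
--     return "Unknown"
-- ===== SOURCE B (Python) =====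
-- def extract_title_from_path(file_path):
--     """Extract the module title from a file path by a single left-to-right scan
--     over the slash-normalized path, without building the list of components."""
--     try:
--         s = file_path.replace('\\', '/')
--     except Exception:
--         return "Unknown"
--     i = 0
--     n = len(s)
--     while True:
--         rest = s[i:]
--         if rest.startswith('Filter-') or rest.startswith('Rendering-') or rest.startswith('IO-'):
--             j = s.find('/', i)
--             return rest if j == -1 else s[i:j]
--         j = s.find('/', i)
--         if j == -1:
--             return "Unknown"
--         i = j + 1
-- ===== Notes on version B (the rewrite author's own statement) =====
-- stated objective: alternative
-- what changed: A splits the normalized path into a list of components and loops over that list; B does a single left-to-right scan over the string, testing the three markers at each component start and jumping past the next separator, never materializing the parts list.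
import Mathlib
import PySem

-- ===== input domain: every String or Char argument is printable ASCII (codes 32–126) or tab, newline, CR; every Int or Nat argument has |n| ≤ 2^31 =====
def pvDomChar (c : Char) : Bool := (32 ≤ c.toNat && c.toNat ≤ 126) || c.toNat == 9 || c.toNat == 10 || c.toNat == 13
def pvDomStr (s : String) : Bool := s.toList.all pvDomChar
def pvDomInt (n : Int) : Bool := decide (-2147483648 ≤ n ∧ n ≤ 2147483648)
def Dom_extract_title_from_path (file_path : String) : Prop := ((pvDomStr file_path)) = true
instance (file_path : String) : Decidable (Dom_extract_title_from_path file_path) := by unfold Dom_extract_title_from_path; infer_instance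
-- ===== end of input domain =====

-- B replaces A's split-then-loop by a single left-to-right scan over the
-- slash-normalized path that never materializes the list of components
-- (objective: alternative/idiomatic one-pass formulation; same return value).

-- ===== PORT A =====
-- the for-loop over the split parts
def pvALoop : List String → String
  | [] => "Unknown"
  | p :: ps =>
    if PySem.Str.startswith p "Filter-" || PySem.Str.startswith p "Rendering-"
        || PySem.Str.startswith p "IO-" then p
    else pvALoop ps

def extract_title_from_path (file_path : String) : String :=
  match PySem.Str.split? (PySem.Str.replace file_path "\\" "/") "/" with
  | none => "Unknown"          -- unreachable: the separator "/" is nonempty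
  | some parts => pvALoop parts

-- ===== PORT B =====
-- does the suffix starting here begin with one of the three markers?
def pvHit (cs : List Char) : Bool :=
  "Filter-".toList.isPrefixOf cs || "Rendering-".toList.isPrefixOf cs
    || "IO-".toList.isPrefixOf cs

-- one pass: at each component start, test the markers; on a hit return the
-- characters up to the next '/', otherwise jump past the next '/'.
def pvScan (cs : List Char) : String :=
  if pvHit cs then String.ofList (cs.takeWhile (· ≠ '/'))
  else
    match h : cs.dropWhile (· ≠ '/') with
    | [] => "Unknown"
    | _ :: rest => pvScan rest
termination_by cs.length
decreasing_by
  have hle : (cs.dropWhile (· ≠ '/')).length ≤ cs.length := List.length_dropWhile_le _ _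
  rw [h] at hle
  simpa using Nat.lt_of_lt_of_le (Nat.lt_succ_self _) hle

def extract_title_from_path_alt (file_path : String) : String :=
  pvScan (PySem.Str.replace file_path "\\" "/").toList

-- ===== PRECONDITION & SPEC =====
def Spec_extract_title_from_path (file_path : String) (out : String) : Prop := out = extract_title_from_path_alt file_path
instance (file_path : String) (out : String) : Decidable (Spec_extract_title_from_path file_path out) := by unfold Spec_extract_title_from_path; infer_instance

-- ===== CLAIM (what is proved, stated in full; the proofs are below) =====
def Claim_equal_extract_title_from_path : Prop := ∀ (file_path : String), Dom_extract_title_from_path file_path → Spec_extract_title_from_path file_path (extract_title_from_path file_path)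

-- ===== LEMMAS AND PROOFS =====

-- reference shape of Python's split on a single-character separator '/'
def pvMySplit (cs : List Char) : List (List Char) :=
  match h : cs.dropWhile (· ≠ '/') with
  | [] => [cs.takeWhile (· ≠ '/')]
  | _ :: rest => cs.takeWhile (· ≠ '/') :: pvMySplit rest
termination_by cs.length
decreasing_by
  have hle : (cs.dropWhile (· ≠ '/')).length ≤ cs.length := List.length_dropWhile_le _ _
  rw [h] at hle
  simpa using Nat.lt_of_lt_of_le (Nat.lt_succ_self _) hle

theorem pvMySplit_eq_nil (cs : List Char) (h : cs.dropWhile (· ≠ '/') = []) :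
    pvMySplit cs = [cs.takeWhile (· ≠ '/')] := by
  rw [pvMySplit]
  split
  · rfl
  · next x rest heq => rw [h] at heq; cases heq

theorem pvMySplit_eq_cons (cs : List Char) (x : Char) (rest : List Char)
    (h : cs.dropWhile (· ≠ '/') = x :: rest) :
    pvMySplit cs = cs.takeWhile (· ≠ '/') :: pvMySplit rest := by
  rw [pvMySplit]
  split
  · next heq => rw [h] at heq; cases heq
  · next y r heq =>
      rw [h] at heq
      cases heq
      rfl

theorem pvScan_eq_nil (cs : List Char) (h : cs.dropWhile (· ≠ '/') = []) :
    pvScan cs = if pvHit cs then String.ofList (cs.takeWhile (· ≠ '/')) else "Unknown" := by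
  rw [pvScan]
  by_cases hh : pvHit cs
  · simp [hh]
  · simp only [hh, if_false, Bool.false_eq_true]
    split
    · rfl
    · next x rest heq => rw [h] at heq; cases heq

theorem pvScan_eq_cons (cs : List Char) (x : Char) (rest : List Char)
    (h : cs.dropWhile (· ≠ '/') = x :: rest) :
    pvScan cs = if pvHit cs then String.ofList (cs.takeWhile (· ≠ '/')) else pvScan rest := by
  rw [pvScan]
  by_cases hh : pvHit cs
  · simp [hh]
  · simp only [hh, if_false, Bool.false_eq_true]
    split
    · next heq => rw [h] at heq; cases heq
    · next y r heq => rw [h] at heq; cases heq; rfl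

theorem pvSplitOn_go_eq : ∀ (fuel : Nat) (l cur : List Char) (acc : List (List Char)),
    l.length < fuel →
    PySem.Chars.splitOn.go ['/'] fuel l cur acc
      = acc.reverse ++ (pvMySplit l).modifyHead (cur.reverse ++ ·) := by
  intro fuel
  induction fuel with
  | zero => intro l cur acc h; omega
  | succ f ih =>
    intro l cur acc h
    match l with
    | [] =>
      rw [PySem.Chars.splitOn.go, pvMySplit_eq_nil [] (by simp)]
      simp
      omega
    | c :: rest =>
      by_cases hc : c = '/'
      · subst hc
        rw [PySem.Chars.splitOn.go]
        have hpre : List.isPrefixOf ['/'] ('/' :: rest) = true := by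
          simp [List.isPrefixOf]
        rw [if_pos hpre]
        have hdrop : List.drop ['/'].length ('/' :: rest) = rest := rfl
        rw [hdrop]
        have hlen : rest.length < f := by simpa using h
        rw [ih _ _ _ hlen]
        have hd : ('/' :: rest).dropWhile (· ≠ '/') = '/' :: rest := by
          simp [List.dropWhile]
        rw [pvMySplit_eq_cons _ _ _ hd]
        have ht : ('/' :: rest).takeWhile (· ≠ '/') = [] := by
          simp [List.takeWhile]
        rw [ht]
        rcases pvMySplit rest with _ | ⟨a, tl⟩ <;> simp [List.modifyHead]
      · rw [PySem.Chars.splitOn.go]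
        have hpre : List.isPrefixOf ['/'] (c :: rest) = false := by
          simp only [List.isPrefixOf, Bool.and_eq_false_iff, beq_eq_false_iff_ne]
          exact Or.inl (fun hcc => hc hcc.symm)
        rw [if_neg (by simp [hpre])]
        have hlen : rest.length < f := by simpa using h
        rw [ih _ _ _ hlen]
        have hd : (c :: rest).dropWhile (· ≠ '/') = rest.dropWhile (· ≠ '/') := by
          simp [List.dropWhile, hc]
        have ht : (c :: rest).takeWhile (· ≠ '/') = c :: rest.takeWhile (· ≠ '/') := by
          simp [List.takeWhile, hc]
        rcases hrest : rest.dropWhile (· ≠ '/') with _ | ⟨x, r⟩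
        · rw [pvMySplit_eq_nil _ hrest, pvMySplit_eq_nil _ (hd.trans hrest), ht]
          simp [List.modifyHead]
        · rw [pvMySplit_eq_cons _ _ _ hrest, pvMySplit_eq_cons _ _ _ (hd.trans hrest), ht]
          simp [List.modifyHead]

theorem pvSplitOn_eq (cs : List Char) :
    PySem.Chars.splitOn cs ['/'] = pvMySplit cs := by
  rw [PySem.Chars.splitOn, pvSplitOn_go_eq (cs.length + 1) cs [] [] (by omega)]
  rcases h : pvMySplit cs with _ | ⟨x, r⟩ <;> simp [List.modifyHead]

-- a marker containing no '/' is a prefix of cs iff it is a prefix of the first component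
theorem pvPrefix_takeWhile (p cs : List Char) (hp : ∀ c ∈ p, c ≠ '/') :
    p.isPrefixOf (cs.takeWhile (· ≠ '/')) = p.isPrefixOf cs := by
  induction p generalizing cs with
  | nil => simp [List.isPrefixOf]
  | cons a p' ih =>
    match cs with
    | [] => simp [List.takeWhile, List.isPrefixOf]
    | c :: cs' =>
      by_cases hc : c = '/'
      · subst hc
        have ha : a ≠ '/' := hp a (by simp)
        have ht : ('/' :: cs').takeWhile (· ≠ '/') = [] := by simp [List.takeWhile]
        rw [ht]
        simp only [List.isPrefixOf]
        symm
        simp only [Bool.and_eq_false_iff, beq_eq_false_iff_ne]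
        exact Or.inl ha
      · have ht : (c :: cs').takeWhile (· ≠ '/') = c :: cs'.takeWhile (· ≠ '/') := by
          simp [List.takeWhile, hc]
        rw [ht]
        simp only [List.isPrefixOf]
        by_cases hac : a == c
        · have h' := ih cs' (fun x hx => hp x (by simp [hx]))
          simp only [hac, Bool.true_and]
          simpa using h'
        · simp [hac]

set_option maxRecDepth 4000 in
theorem pvHit_eq (cs : List Char) :
    (PySem.Str.startswith (String.ofList (cs.takeWhile (· ≠ '/'))) "Filter-"
      || PySem.Str.startswith (String.ofList (cs.takeWhile (· ≠ '/'))) "Rendering-"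
      || PySem.Str.startswith (String.ofList (cs.takeWhile (· ≠ '/'))) "IO-") = pvHit cs := by
  have h1 := pvPrefix_takeWhile ['F', 'i', 'l', 't', 'e', 'r', '-'] cs (by simp)
  have h2 := pvPrefix_takeWhile ['R', 'e', 'n', 'd', 'e', 'r', 'i', 'n', 'g', '-'] cs (by simp)
  have h3 := pvPrefix_takeWhile ['I', 'O', '-'] cs (by simp)
  simp only [ne_eq, decide_not] at h1 h2 h3
  simp only [PySem.Str.startswith, PySem.Chars.startswith, pvHit]
  simp [h1, h2, h3]

theorem pvLoop_eq_scan (cs : List Char) :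
    pvALoop ((pvMySplit cs).map String.ofList) = pvScan cs := by
  rcases h : cs.dropWhile (· ≠ '/') with _ | ⟨x, rest⟩
  · rw [pvMySplit_eq_nil _ h, pvScan_eq_nil _ h]
    simp only [List.map, pvALoop, pvHit_eq]
  · rw [pvMySplit_eq_cons _ _ _ h, pvScan_eq_cons _ _ _ h]
    simp only [List.map, pvALoop, pvHit_eq]
    by_cases hh : pvHit cs
    · simp [hh]
    · simp [hh, pvLoop_eq_scan rest]
termination_by cs.length
decreasing_by
  have hle : (cs.dropWhile (· ≠ '/')).length ≤ cs.length := List.length_dropWhile_le _ _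
  rw [h] at hle
  simpa using Nat.lt_of_lt_of_le (Nat.lt_succ_self _) hle

-- ===== VERDICT (by name: the statement is the Claim_ definition above) =====
theorem extract_title_from_path_spec : Claim_equal_extract_title_from_path := by
  intro fp _
  unfold Spec_extract_title_from_path extract_title_from_path extract_title_from_path_alt
  rw [PySem.Str.split?]
  have hsep : ("/" : String).toList = ['/'] := rfl
  rw [hsep, PySem.Chars.split?, if_neg (by decide), Option.map_some]
  rw [pvSplitOn_eq]
  show pvALoop (List.map String.ofList (pvMySplit (PySem.Str.replace fp "\\" "/").toList))
      = pvScan (PySem.Str.replace fp "\\" "/").toList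
  exact pvLoop_eq_scan _
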